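-- pv_equiv track=rewrite | github.com/Rugved1817/Pansearch | src/api.py | generate_english_spelling_variations
-- ===== SOURCE A (Python) =====
-- def generate_english_spelling_variations(name: str, rules: dict[str, list[str]]) -> set[str]:
-- 	"""Recursively generate phonetic spelling variations based on rules."""
-- 	if not name:
-- 		return {""}
-- 	char = name[0]
-- 	rest = name[1:]
-- 	vars_rest = generate_english_spelling_variations(rest, rules)
-- 	current: set[str] = set()
-- 	for substitution in rules.get(char, [char]):
-- 		for variant in vars_rest:
-- 			current.add(f"{substitution}{variant}")
-- 	return current
-- ===== SOURCE B (Python) =====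
-- def generate_english_spelling_variations(name: str, rules: dict[str, list[str]]) -> set[str]:
-- 	"""Iteratively generate phonetic spelling variations, extending prefixes left-to-right."""
-- 	variants = {""}
-- 	for char in name:
-- 		variants = {prefix + substitution
-- 		            for prefix in variants
-- 		            for substitution in rules.get(char, [char])}
-- 	return variants
-- ===== Notes on version B (the rewrite author's own statement) =====
-- stated objective: idiomatic
-- what changed: Replaced the tail recursion that prepends substitutions to suffix variants with a single left-to-right loop maintaining a set of prefix strings, extended by one set comprehension per character.
import Mathlib
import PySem

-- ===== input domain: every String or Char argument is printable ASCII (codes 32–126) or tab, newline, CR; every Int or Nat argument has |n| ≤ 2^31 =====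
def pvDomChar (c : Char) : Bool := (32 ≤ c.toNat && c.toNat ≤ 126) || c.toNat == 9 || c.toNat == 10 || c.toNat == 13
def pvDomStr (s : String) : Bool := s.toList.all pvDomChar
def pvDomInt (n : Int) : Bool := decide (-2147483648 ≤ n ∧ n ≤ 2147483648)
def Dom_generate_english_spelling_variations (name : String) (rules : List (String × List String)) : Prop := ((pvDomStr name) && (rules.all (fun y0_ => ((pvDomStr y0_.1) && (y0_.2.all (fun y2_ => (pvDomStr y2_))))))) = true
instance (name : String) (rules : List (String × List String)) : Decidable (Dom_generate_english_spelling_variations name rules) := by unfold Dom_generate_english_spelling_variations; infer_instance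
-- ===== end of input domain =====

-- B replaces A's recursion over the tail (prepending substitutions to suffix variants) by a single
-- left-to-right loop over the characters that maintains a set of prefix strings (objective: idiomatic).
-- The return value is a Python set; both ports build it as a PySem.Set (distinct elements, first-insertion order).

-- rules.get(char, [char])  (char a one-character string)
def pvSubs (rules : List (String × List String)) (c : Char) : List String :=
  PySem.Dict.getD (PySem.Dict.mk rules) (String.ofList [c]) [String.ofList [c]]

-- ===== PORT A =====
-- A's recursion: name[0], name[1:], variations of the rest, then a nested loop adding sub ++ variant.
def pvVarsA (rules : List (String × List String)) : List Char → PySem.Set String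
  | [] => PySem.Set.ofList [""]
  | c :: rest =>
    let vars_rest := pvVarsA rules rest
    (pvSubs rules c).foldl
      (fun current substitution =>
        vars_rest.foldl (fun current variant => current.add (substitution ++ variant)) current)
      PySem.Set.empty

def generate_english_spelling_variations (name : String) (rules : List (String × List String)) : List String :=
  pvVarsA rules name.toList

-- ===== PORT B =====
-- B's loop: variants starts as {""}; per character the set comprehension
-- {prefix + substitution for prefix in variants for substitution in rules.get(char, [char])}.
def generate_english_spelling_variations_alt (name : String) (rules : List (String × List String)) : List String :=
  name.toList.foldl
    (fun variants c =>
      PySem.Set.ofList (variants.flatMap (fun pre => (pvSubs rules c).map (fun s => pre ++ s))))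
    (PySem.Set.ofList [""])

-- ===== PRECONDITION & SPEC =====
def Spec_generate_english_spelling_variations (name : String) (rules : List (String × List String)) (out : List String) : Prop := out = generate_english_spelling_variations_alt name rules
instance (name : String) (rules : List (String × List String)) (out : List String) : Decidable (Spec_generate_english_spelling_variations name rules out) := by unfold Spec_generate_english_spelling_variations; infer_instance

-- ===== CLAIM (what is proved, stated in full; the proofs are below) =====
def Claim_equal_generate_english_spelling_variations : Prop := ∀ (name : String) (rules : List (String × List String)), Dom_generate_english_spelling_variations name rules → Spec_generate_english_spelling_variations name rules (generate_english_spelling_variations name rules)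

-- ===== LEMMAS AND PROOFS =====

-- The full substitution product of the name, in the lexicographic order both programs enumerate it,
-- before any deduplication.
def pvProd (rules : List (String × List String)) : List Char → List String
  | [] => [""]
  | c :: rest => (pvSubs rules c).flatMap (fun s => (pvProd rules rest).map (fun v => s ++ v))

-- a loop 'for v in l: s.add(g v)' is an update with the mapped list
theorem pv_foldl_add_eq_update {α : Type} [BEq α] (l : List α) (g : α → α) (s : PySem.Set α) :
    l.foldl (fun cur v => cur.add (g v)) s = s.update (l.map g) := by
  induction l generalizing s with
  | nil => rfl
  | cons x t ih => simp [PySem.Set.update_cons, ih]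

-- updating with elements already present does nothing
theorem pv_update_of_subset {α : Type} [BEq α] [LawfulBEq α] (l : List α) (s : PySem.Set α)
    (h : ∀ a ∈ l, a ∈ s) : s.update l = s := by
  induction l generalizing s with
  | nil => rfl
  | cons x t ih =>
    rw [PySem.Set.update_cons, PySem.Set.add_of_mem (h x (by simp))]
    exact ih s (fun a ha => h a (by simp [ha]))

-- deduplicating the update list first does not change an update
theorem pv_update_ofList {α : Type} [BEq α] [LawfulBEq α] (l : List α) (s : PySem.Set α) :
    s.update (PySem.Set.ofList l) = s.update l := by
  induction l using List.reverseRecOn generalizing s with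
  | nil => rfl
  | append_singleton t x ih =>
    rw [PySem.Set.ofList_append_singleton]
    by_cases hx : x ∈ PySem.Set.ofList t
    · rw [PySem.Set.add_of_mem hx, ih, PySem.Set.update_append]
      have hxt : x ∈ t := (PySem.Set.mem_ofList t x).mp hx
      have : (s.update t).update [x] = s.update t := by
        refine pv_update_of_subset [x] _ (fun a ha => ?_)
        simp only [List.mem_singleton] at ha
        exact (PySem.Set.mem_update s t a).mpr (Or.inr (ha ▸ hxt))
      rw [this]
    · rw [PySem.Set.add_of_not_mem hx, PySem.Set.update_append, PySem.Set.update_append, ih]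

-- an injective map commutes with deduplication
theorem pv_map_ofList {α : Type} [BEq α] [LawfulBEq α] (f : α → α) (hf : Function.Injective f)
    (l : List α) : (PySem.Set.ofList l).map f = PySem.Set.ofList (l.map f) := by
  induction l using List.reverseRecOn with
  | nil => rfl
  | append_singleton t x ih =>
    simp only [List.map_append, List.map_cons, List.map_nil]
    rw [PySem.Set.ofList_append_singleton, PySem.Set.ofList_append_singleton]
    by_cases hx : x ∈ PySem.Set.ofList t
    · have hxt : x ∈ t := (PySem.Set.mem_ofList t x).mp hx
      rw [PySem.Set.add_of_mem hx, ih, PySem.Set.add_of_mem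
        ((PySem.Set.mem_ofList (t.map f) (f x)).mpr (List.mem_map_of_mem hxt))]
    · have hxt : x ∉ t := fun h => hx ((PySem.Set.mem_ofList t x).mpr h)
      have hfx : f x ∉ PySem.Set.ofList (t.map f) := by
        intro h
        rcases List.mem_map.mp ((PySem.Set.mem_ofList (t.map f) (f x)).mp h) with ⟨a, ha, hfa⟩
        exact hxt (hf hfa ▸ ha)
      rw [PySem.Set.add_of_not_mem hx, List.map_append, ih, PySem.Set.add_of_not_mem hfx]
      rfl

-- a loop of updates is one update with the flattened list
theorem pv_foldl_update_eq_update {α β : Type} [BEq α] (A : List β) (g : β → List α)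
    (s : PySem.Set α) : A.foldl (fun s x => s.update (g x)) s = s.update (A.flatMap g) := by
  induction A generalizing s with
  | nil => rfl
  | cons x t ih => simp [List.flatMap_cons, PySem.Set.update_append, ih]

-- deduplicating the outer list of a flatMap before collecting does not change the resulting set
theorem pv_ofList_flatMap_ofList {α : Type} [BEq α] [LawfulBEq α] (A : List α) (g : α → List α) :
    PySem.Set.ofList ((PySem.Set.ofList A).flatMap g) = PySem.Set.ofList (A.flatMap g) := by
  induction A using List.reverseRecOn with
  | nil => rfl
  | append_singleton t x ih =>
    rw [PySem.Set.ofList_append_singleton]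
    by_cases hx : x ∈ PySem.Set.ofList t
    · have hxt : x ∈ t := (PySem.Set.mem_ofList t x).mp hx
      rw [PySem.Set.add_of_mem hx, ih, List.flatMap_append, PySem.Set.ofList_append]
      refine (pv_update_of_subset _ _ (fun a ha => ?_)).symm
      simp only [List.flatMap_cons, List.flatMap_nil, List.append_nil] at ha
      exact (PySem.Set.mem_ofList _ a).mpr (List.mem_flatMap.mpr ⟨x, hxt, ha⟩)
    · rw [PySem.Set.add_of_not_mem hx, List.flatMap_append, List.flatMap_append,
        PySem.Set.ofList_append, PySem.Set.ofList_append, ih]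

theorem pv_append_left_injective (p : String) : Function.Injective (fun s => p ++ s) := by
  intro a b h
  exact (String.append_right_inj p).mp h

-- A's recursion produces exactly the deduplicated product list
theorem pvVarsA_eq (rules : List (String × List String)) (cs : List Char) :
    pvVarsA rules cs = PySem.Set.ofList (pvProd rules cs) := by
  induction cs with
  | nil => rfl
  | cons c rest ih =>
    show (pvSubs rules c).foldl
        (fun current substitution =>
          (pvVarsA rules rest).foldl
            (fun current variant => current.add (substitution ++ variant)) current)
        PySem.Set.empty = _
    have hinner : ∀ (sub : String) (cur : PySem.Set String),
        (pvVarsA rules rest).foldl (fun current variant => current.add (sub ++ variant)) cur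
          = cur.update ((pvProd rules rest).map (fun v => sub ++ v)) := by
      intro sub cur
      rw [ih, pv_foldl_add_eq_update, pv_map_ofList _ (pv_append_left_injective sub),
        pv_update_ofList]
    simp only [hinner]
    rw [pv_foldl_update_eq_update, PySem.Set.empty_eq, PySem.Set.update_nil_left]
    rfl

-- B's loop, started from any collected prefix list X, produces the deduplicated product of
-- X with the remaining characters' substitution lists
theorem pvAltLoop_eq (rules : List (String × List String)) (cs : List Char) (X : List String) :
    cs.foldl
      (fun variants c =>
        PySem.Set.ofList (variants.flatMap (fun p => (pvSubs rules c).map (fun s => p ++ s))))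
      (PySem.Set.ofList X)
    = PySem.Set.ofList (X.flatMap (fun p => (pvProd rules cs).map (fun v => p ++ v))) := by
  induction cs generalizing X with
  | nil =>
    show PySem.Set.ofList X = _
    simp [pvProd]
  | cons c rest ih =>
    rw [List.foldl_cons, pv_ofList_flatMap_ofList, ih]
    congr 1
    simp only [pvProd, List.flatMap_assoc, List.map_flatMap, List.flatMap_map, List.map_map,
      Function.comp_def, String.append_assoc]

theorem pvAlt_eq (rules : List (String × List String)) (name : String) :
    generate_english_spelling_variations_alt name rules
      = PySem.Set.ofList (pvProd rules name.toList) := by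
  show name.toList.foldl _ (PySem.Set.ofList [""]) = _
  rw [pvAltLoop_eq rules name.toList [""]]
  simp

-- ===== VERDICT (by name: the statement is the Claim_ definition above) =====
theorem generate_english_spelling_variations_spec : Claim_equal_generate_english_spelling_variations := by
  intro name rules _
  show generate_english_spelling_variations name rules = _
  rw [generate_english_spelling_variations, pvVarsA_eq, pvAlt_eq]
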